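-- pv_equiv track=rewrite | github.com/6harat/pop-fundamentals | problems/poisonous_plants.py | poisonousPlants_bruteForce
-- ===== SOURCE A (Python) =====
-- def poisonousPlants_bruteForce(n, p):
--     opt = 0
--     plants = p
--     while plants:
--         has_dels = False
--         prev = plants[0]
--         plants_new = [prev]
--         for val in plants[1:]:
--             if prev >= val:
--                 plants_new.append(val)
--             else:
--                 has_dels = True
--             prev = val
--         if not has_dels:
--             return opt
--         plants = plants_new
--         opt += 1
--     return opt
-- ===== SOURCE B (Python) =====
-- def poisonousPlants_bruteForce(n, p):
--     ans = 0
--     stack = []  # (value, day on which this plant dies; 0 = never dies)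
--     for v in p:
--         days = 0
--         while stack and stack[-1][0] >= v:
--             days = max(days, stack.pop()[1])
--         days = days + 1 if stack else 0
--         ans = max(ans, days)
--         stack.append((v, days))
--     return ans
-- ===== Notes on version B (the rewrite author's own statement) =====
-- stated objective: alternative
-- what changed: A repeatedly rebuilds the whole list, one pass per day, until no plant is deleted; B makes a single left-to-right pass with a monotone stack that computes each plant's death day ((max death day of the popped taller-or-equal neighbours) + 1, or 0 if nothing smaller remains to its left) and returns the maximum death day.
import Mathlib
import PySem

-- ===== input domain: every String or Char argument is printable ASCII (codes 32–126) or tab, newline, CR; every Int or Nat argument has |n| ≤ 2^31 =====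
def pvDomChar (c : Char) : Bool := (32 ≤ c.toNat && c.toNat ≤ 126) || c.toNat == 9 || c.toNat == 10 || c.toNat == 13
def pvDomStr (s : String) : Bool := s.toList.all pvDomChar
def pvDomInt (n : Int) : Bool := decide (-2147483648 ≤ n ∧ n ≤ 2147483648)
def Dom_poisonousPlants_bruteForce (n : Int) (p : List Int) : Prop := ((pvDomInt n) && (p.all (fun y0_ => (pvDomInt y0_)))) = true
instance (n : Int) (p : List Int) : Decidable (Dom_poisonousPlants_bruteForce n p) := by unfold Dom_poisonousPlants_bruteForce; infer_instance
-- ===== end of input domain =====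

-- B replaces A's repeated whole-list passes (one per day) by one left-to-right pass with a
-- stack computing each plant's death day; the answer is the maximum death day.

-- ===== PORT A =====
-- A's inner for-loop over plants[1:]: carries (has_dels, kept tail) with running prev.
def pvStepA (prev : Int) : List Int → Bool × List Int
  | [] => (false, [])
  | v :: rest =>
      let r := pvStepA v rest
      if prev ≥ v then (r.1, v :: r.2) else (true, r.2)

theorem pvStepA_len_le (prev : Int) (l : List Int) : (pvStepA prev l).2.length ≤ l.length := by
  induction l generalizing prev with
  | nil => simp [pvStepA]
  | cons v rest ih =>
      simp only [pvStepA]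
      split <;> simp only [List.length_cons]
      · exact Nat.succ_le_succ (ih v)
      · exact (ih v).trans (Nat.le_succ _)

theorem pvStepA_len_lt (prev : Int) (l : List Int) (h : (pvStepA prev l).1 = true) :
    (pvStepA prev l).2.length < l.length := by
  induction l generalizing prev with
  | nil => simp [pvStepA] at h
  | cons v rest ih =>
      simp only [pvStepA] at h ⊢
      by_cases hp : prev ≥ v
      · simp only [if_pos hp] at h ⊢
        exact Nat.succ_lt_succ (ih v h)
      · simp only [if_neg hp]
        exact Nat.lt_succ_of_le (pvStepA_len_le v rest)

-- A's while-loop.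
def pvGoA (opt : Int) (plants : List Int) : Int :=
  match plants with
  | [] => opt
  | x :: rest =>
      if h : (pvStepA x rest).1 = true then
        pvGoA (opt + 1) (x :: (pvStepA x rest).2)
      else opt
termination_by plants.length
decreasing_by
  simp only [List.length_cons]
  exact Nat.succ_lt_succ (pvStepA_len_lt _ _ h)

def poisonousPlants_bruteForce (n : Int) (p : List Int) : Int := pvGoA 0 p

-- ===== PORT B =====
-- pop while the stack top is ≥ v, accumulating the max death day of the popped entries.
def pvPop : List (Int × Int) → Int → Int → Int × List (Int × Int)
  | [], _, days => (days, [])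
  | (u, d) :: rest, v, days =>
      if u ≥ v then pvPop rest v (max days d) else (days, (u, d) :: rest)

-- one iteration of B's for-loop: state = (ans, stack), stack top first.
def pvBStep (st : Int × List (Int × Int)) (v : Int) : Int × List (Int × Int) :=
  let r := pvPop st.2 v 0
  let d : Int := if r.2 = [] then 0 else r.1 + 1
  (max st.1 d, (v, d) :: r.2)

def poisonousPlants_bruteForce_alt (n : Int) (p : List Int) : Int :=
  (p.foldl pvBStep (0, [])).1

-- ===== PRECONDITION & SPEC =====
def Spec_poisonousPlants_bruteForce (n : Int) (p : List Int) (out : Int) : Prop := out = poisonousPlants_bruteForce_alt n p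
instance (n : Int) (p : List Int) (out : Int) : Decidable (Spec_poisonousPlants_bruteForce n p out) := by unfold Spec_poisonousPlants_bruteForce; infer_instance

-- ===== CLAIM (what is proved, stated in full; the proofs are below) =====
def Claim_equal_poisonousPlants_bruteForce : Prop := ∀ (n : Int) (p : List Int), Dom_poisonousPlants_bruteForce n p → Spec_poisonousPlants_bruteForce n p (poisonousPlants_bruteForce n p)

-- ===== LEMMAS AND PROOFS =====

-- one day of A's simulation, as a list transformer
def pvStep : List Int → List Int
  | [] => []
  | x :: xs => x :: (pvStepA x xs).2

theorem pvStepA_fst_false_iff (prev : Int) (l : List Int) :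
    (pvStepA prev l).1 = false ↔ List.IsChain (· ≥ ·) (prev :: l) := by
  induction l generalizing prev with
  | nil => simp [pvStepA]
  | cons v rest ih =>
      simp only [pvStepA, List.isChain_cons_cons]
      by_cases hp : prev ≥ v
      · simp [hp, ih v]
      · simp [hp]

theorem pvStepA_snd_of_chain (prev : Int) (l : List Int)
    (h : List.IsChain (· ≥ ·) (prev :: l)) : (pvStepA prev l).2 = l := by
  induction l generalizing prev with
  | nil => simp [pvStepA]
  | cons v rest ih =>
      rw [List.isChain_cons_cons] at h
      simp [pvStepA, h.1, ih v h.2]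

theorem pvStep_of_chain {q : List Int} (h : List.IsChain (· ≥ ·) q) : pvStep q = q := by
  cases q with
  | nil => rfl
  | cons x xs => simp [pvStep, pvStepA_snd_of_chain x xs h]

theorem pvStep_ne_nil {q : List Int} (h : q ≠ []) : pvStep q ≠ [] := by
  cases q with
  | nil => exact absurd rfl h
  | cons x xs => simp [pvStep]

theorem pvStep_len_lt {q : List Int} (h : ¬ List.IsChain (· ≥ ·) q) :
    (pvStep q).length < q.length := by
  cases q with
  | nil => exact absurd List.IsChain.nil h
  | cons x xs =>
      have hf : (pvStepA x xs).1 = true := by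
        cases hb : (pvStepA x xs).1 with
        | true => rfl
        | false => exact absurd ((pvStepA_fst_false_iff x xs).mp hb) h
      simpa [pvStep] using Nat.succ_lt_succ (pvStepA_len_lt x xs hf)

-- the day count of A's simulation (reference function)
def pvAcount (q : List Int) : ℕ :=
  if h : List.IsChain (· ≥ ·) q then 0 else 1 + pvAcount (pvStep q)
termination_by q.length
decreasing_by exact pvStep_len_lt h

theorem pvAcount_char (t : ℕ) (q : List Int) :
    List.IsChain (· ≥ ·) (pvStep^[t] q) ↔ pvAcount q ≤ t := by
  induction t generalizing q with
  | zero =>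
      simp only [Function.iterate_zero, id_eq]
      rw [pvAcount]
      split_ifs with h
      · simpa using h
      · simp [h]
  | succ t ih =>
      rw [Function.iterate_succ_apply, ih (pvStep q)]
      by_cases h : List.IsChain (· ≥ ·) q
      · have h0 : pvAcount q = 0 := by rw [pvAcount]; simp [h]
        rw [pvStep_of_chain h, h0]
        simp
      · have hq : pvAcount q = 1 + pvAcount (pvStep q) := by rw [pvAcount]; simp [h]
        rw [hq]
        omega

theorem pvIter_ne_nil (t : ℕ) {q : List Int} (h : q ≠ []) : pvStep^[t] q ≠ [] := by
  induction t with
  | zero => simpa using h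
  | succ t ih => rw [Function.iterate_succ_apply']; exact pvStep_ne_nil ih

-- last element of the simulated list after t days
def pvLam (q : List Int) (t : ℕ) : Int := (pvStep^[t] q).getLastD 0

theorem pvGetLastD_cons {α : Type} {x : α} {l : List α} (h : l ≠ []) (d : α) :
    (x :: l).getLastD d = l.getLastD d := by
  cases l with
  | nil => exact absurd rfl h
  | cons y m => simp [List.getLastD_cons]

theorem pvStepA_snd_append (l : List Int) (prev v : Int) :
    (pvStepA prev (l ++ [v])).2 =
      if (prev :: l).getLastD 0 ≥ v then (pvStepA prev l).2 ++ [v] else (pvStepA prev l).2 := by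
  induction l generalizing prev with
  | nil =>
      simp only [List.nil_append, pvStepA, List.getLastD_cons, List.getLastD_nil]
      split_ifs <;> simp [pvStepA]
  | cons a l' ih =>
      have hlast : (prev :: a :: l').getLastD 0 = (a :: l').getLastD 0 :=
        pvGetLastD_cons (by simp) 0
      simp only [List.cons_append, pvStepA, ih a, hlast]
      split_ifs <;> simp

theorem pvStep_append {q : List Int} (h : q ≠ []) (v : Int) :
    pvStep (q ++ [v]) = if q.getLastD 0 ≥ v then pvStep q ++ [v] else pvStep q := by
  cases q with
  | nil => exact absurd rfl h
  | cons x xs =>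
      simp only [List.cons_append, pvStep, pvStepA_snd_append xs x v]
      split_ifs <;> simp

theorem pvChain_append_singleton {q : List Int} (h : q ≠ []) (v : Int) :
    List.IsChain (· ≥ ·) (q ++ [v]) ↔ List.IsChain (· ≥ ·) q ∧ q.getLastD 0 ≥ v := by
  rw [List.isChain_append]
  cases hq : q.getLast? with
  | none => exact absurd (List.getLast?_eq_none_iff.mp hq) h
  | some x =>
      have hx : q.getLastD 0 = x := by rw [List.getLastD_eq_getLast?, hq]; rfl
      simp [hq, hx]

theorem pvIter_append_le {q : List Int} (h : q ≠ []) (v : Int) (t : ℕ)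
    (hle : ∀ s, s < t → v ≤ pvLam q s) :
    pvStep^[t] (q ++ [v]) = pvStep^[t] q ++ [v] := by
  induction t with
  | zero => simp
  | succ t ih =>
      rw [Function.iterate_succ_apply', Function.iterate_succ_apply',
        ih (fun s hs => hle s (hs.trans (Nat.lt_succ_self t))),
        pvStep_append (pvIter_ne_nil t h) v,
        if_pos (show (pvStep^[t] q).getLastD 0 ≥ v from hle t (Nat.lt_succ_self t))]

theorem pvIter_stable {q : List Int} {t : ℕ} (h : List.IsChain (· ≥ ·) (pvStep^[t] q))
    {u : ℕ} (hu : t ≤ u) : pvStep^[u] q = pvStep^[t] q := by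
  obtain ⟨k, rfl⟩ := Nat.exists_eq_add_of_le hu
  rw [Nat.add_comm, Function.iterate_add_apply]
  exact Function.iterate_fixed (pvStep_of_chain h) k

theorem pvIter_append_drop {q : List Int} (h : q ≠ []) (v : Int) {s₀ : ℕ}
    (h1 : pvLam q s₀ < v) (h2 : ∀ s, s < s₀ → v ≤ pvLam q s) {t : ℕ} (ht : s₀ < t) :
    pvStep^[t] (q ++ [v]) = pvStep^[t] q := by
  have base : pvStep^[s₀ + 1] (q ++ [v]) = pvStep^[s₀ + 1] q := by
    rw [Function.iterate_succ_apply', Function.iterate_succ_apply',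
      pvIter_append_le h v s₀ h2, pvStep_append (pvIter_ne_nil s₀ h) v,
      if_neg (not_le.mpr (show (pvStep^[s₀] q).getLastD 0 < v from h1))]
  obtain ⟨k, rfl⟩ := Nat.exists_eq_add_of_lt ht
  have e1 : s₀ + k + 1 = k + (s₀ + 1) := by omega
  rw [e1, Function.iterate_add_apply pvStep k (s₀ + 1) (q ++ [v]),
    Function.iterate_add_apply pvStep k (s₀ + 1) q, base]

theorem pvNat_eq_of_le_iff {a b : ℕ} (h : ∀ t, a ≤ t ↔ b ≤ t) : a = b :=
  le_antisymm ((h b).mpr le_rfl) ((h a).mp le_rfl)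

theorem pvAcount_append_immortal {q : List Int} (h : q ≠ []) (v : Int)
    (hle : ∀ t, v ≤ pvLam q t) : pvAcount (q ++ [v]) = pvAcount q := by
  apply pvNat_eq_of_le_iff
  intro t
  rw [← pvAcount_char, ← pvAcount_char, pvIter_append_le h v t (fun s _ => hle s),
    pvChain_append_singleton (pvIter_ne_nil t h) v]
  exact ⟨fun hc => hc.1, fun hc => ⟨hc, hle t⟩⟩

theorem pvAcount_append_mortal {q : List Int} (h : q ≠ []) (v : Int) {s₀ : ℕ}
    (h1 : pvLam q s₀ < v) (h2 : ∀ s, s < s₀ → v ≤ pvLam q s) :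
    pvAcount (q ++ [v]) = max (pvAcount q) (s₀ + 1) := by
  apply pvNat_eq_of_le_iff
  intro t
  rw [← pvAcount_char, Nat.max_le, ← pvAcount_char]
  by_cases hts : s₀ < t
  · rw [pvIter_append_drop h v h1 h2 hts]
    exact ⟨fun hc => ⟨hc, hts⟩, fun hc => hc.1⟩
  · have hts' : t ≤ s₀ := Nat.le_of_not_lt hts
    constructor
    · intro hc
      exfalso
      rw [pvIter_append_le h v t (fun s hs => h2 s (hs.trans_le hts')),
        pvChain_append_singleton (pvIter_ne_nil t h) v] at hc
      have hst : pvStep^[s₀] q = pvStep^[t] q := pvIter_stable hc.1 hts'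
      have : v ≤ pvLam q s₀ := by
        unfold pvLam
        rw [hst]
        exact hc.2
      omega
    · intro hc
      omega

-- value of the topmost stack entry still alive after day t (tag 0 = immortal)
def pvSelect : List (Int × Int) → ℕ → Int
  | [], _ => 0
  | (v, d) :: r, t => if d = 0 ∨ (t : Int) < d then v else pvSelect r t

def pvMaxD (d₀ : Int) (l : List (Int × Int)) : Int :=
  l.foldl (fun m e => max m e.2) d₀

theorem pvMaxD_ge_init (d₀ : Int) (l : List (Int × Int)) : d₀ ≤ pvMaxD d₀ l := by
  induction l generalizing d₀ with
  | nil => exact le_refl d₀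
  | cons e l ih => exact (le_max_left d₀ e.2).trans (ih (max d₀ e.2))

theorem pvMaxD_ge_mem (d₀ : Int) {l : List (Int × Int)} {e : Int × Int} (h : e ∈ l) :
    e.2 ≤ pvMaxD d₀ l := by
  induction l generalizing d₀ with
  | nil => exact absurd h (List.not_mem_nil)
  | cons x l ih =>
      rcases List.mem_cons.mp h with rfl | hm
      · exact (le_max_right d₀ e.2).trans (pvMaxD_ge_init (max d₀ e.2) l)
      · exact ih (max d₀ x.2) hm

theorem pvMaxD_cases (d₀ : Int) (l : List (Int × Int)) :
    pvMaxD d₀ l = d₀ ∨ ∃ e ∈ l, pvMaxD d₀ l = e.2 := by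
  induction l generalizing d₀ with
  | nil => exact Or.inl rfl
  | cons x l ih =>
      have hx : pvMaxD d₀ (x :: l) = pvMaxD (max d₀ x.2) l := rfl
      rcases ih (max d₀ x.2) with h | ⟨e, he, h⟩
      · rcases le_total x.2 d₀ with h2 | h2
        · exact Or.inl (by rw [hx, h, max_eq_left h2])
        · exact Or.inr ⟨x, List.mem_cons_self, by rw [hx, h, max_eq_right h2]⟩
      · exact Or.inr ⟨e, List.mem_cons_of_mem x he, by rw [hx, h]⟩

theorem pvPop_spec (st : List (Int × Int)) (v d₀ : Int) :
    ∃ pp, st = pp ++ (pvPop st v d₀).2 ∧ (∀ e ∈ pp, v ≤ e.1) ∧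
      (pvPop st v d₀).1 = pvMaxD d₀ pp ∧
      (∀ u du r', (pvPop st v d₀).2 = (u, du) :: r' → u < v) := by
  induction st generalizing d₀ with
  | nil => exact ⟨[], by simp [pvPop], by simp, rfl, by simp [pvPop]⟩
  | cons x rest ih =>
      obtain ⟨u, d⟩ := x
      by_cases hu : u ≥ v
      · have hp : pvPop ((u, d) :: rest) v d₀ = pvPop rest v (max d₀ d) := by
          simp [pvPop, hu]
        obtain ⟨pp', e1, e2, e3, e4⟩ := ih (max d₀ d)
        refine ⟨(u, d) :: pp', ?_, ?_, ?_, ?_⟩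
        · rw [hp, List.cons_append, ← e1]
        · intro e he
          rcases List.mem_cons.mp he with rfl | hm
          · exact hu
          · exact e2 e hm
        · rw [hp, e3]; rfl
        · rw [hp]; exact e4
      · have hp : pvPop ((u, d) :: rest) v d₀ = (d₀, (u, d) :: rest) := by
          simp [pvPop, hu]
        refine ⟨[], by simp [hp], by simp, by simp [hp, pvMaxD], ?_⟩
        intro u' du' r' he
        rw [hp] at he
        injection he with h1 h2
        injection h1 with h1a h1b
        exact h1a ▸ lt_of_not_ge hu

theorem pvSelect_append_skip {pp : List (Int × Int)} {t : ℕ}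
    (h : ∀ e ∈ pp, ¬(e.2 = 0 ∨ (t : Int) < e.2)) (r : List (Int × Int)) :
    pvSelect (pp ++ r) t = pvSelect r t := by
  induction pp with
  | nil => simp
  | cons x pp' ih =>
      obtain ⟨v0, d0⟩ := x
      have hx := h (v0, d0) (List.mem_cons_self ..)
      simp only [List.cons_append, pvSelect, if_neg hx]
      exact ih (fun e he => h e (List.mem_cons_of_mem _ he))

theorem pvSelect_mem {st : List (Int × Int)} (h : st ≠ []) (h0 : (st.getLastD (0,0)).2 = 0)
    (t : ℕ) : ∃ d, (pvSelect st t, d) ∈ st := by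
  induction st with
  | nil => exact absurd rfl h
  | cons x r ih =>
      obtain ⟨v0, d0⟩ := x
      by_cases hq : d0 = 0 ∨ (t : Int) < d0
      · exact ⟨d0, by simp [pvSelect, hq]⟩
      · by_cases hrne : r = []
        · subst hrne
          simp only [List.getLastD] at h0
          exact absurd (Or.inl h0) hq
        · have h0' : (r.getLastD (0,0)).2 = 0 := by
            rwa [pvGetLastD_cons hrne] at h0
          obtain ⟨d, hd⟩ := ih hrne h0'
          refine ⟨d, ?_⟩
          simp only [pvSelect, if_neg hq]
          exact List.mem_cons_of_mem _ hd

theorem pvSelect_append_qual {pp : List (Int × Int)} {t : ℕ} {e : Int × Int}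
    (he : e ∈ pp) (hq : e.2 = 0 ∨ (t : Int) < e.2) (r : List (Int × Int)) :
    ∃ d, (pvSelect (pp ++ r) t, d) ∈ pp := by
  induction pp with
  | nil => exact absurd he (List.not_mem_nil)
  | cons x pp' ih =>
      obtain ⟨v0, d0⟩ := x
      by_cases hx : d0 = 0 ∨ (t : Int) < d0
      · exact ⟨d0, by simp [pvSelect, hx]⟩
      · rcases List.mem_cons.mp he with rfl | hm
        · exact absurd hq hx
        · obtain ⟨d, hd⟩ := ih hm
          refine ⟨d, ?_⟩
          simp only [List.cons_append, pvSelect, if_neg hx]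
          exact List.mem_cons_of_mem _ hd

theorem pvSelect_le_head {u du : Int} {r : List (Int × Int)}
    (hc : List.IsChain (fun a b => b.1 < a.1) ((u, du) :: r))
    (h0 : (((u, du) :: r).getLastD (0,0)).2 = 0) (t : ℕ) :
    pvSelect ((u, du) :: r) t ≤ u := by
  haveI : Trans (fun (a b : Int × Int) => b.1 < a.1)
      (fun (a b : Int × Int) => b.1 < a.1)
      (fun (a b : Int × Int) => b.1 < a.1) := ⟨fun h1 h2 => lt_trans h2 h1⟩
  have hpw : List.Pairwise (fun a b => b.1 < a.1) ((u, du) :: r) :=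
    List.isChain_iff_pairwise.mp hc
  obtain ⟨d, hd⟩ := pvSelect_mem (List.cons_ne_nil _ _) h0 t
  rcases List.mem_cons.mp hd with he | hm
  · rw [show pvSelect ((u, du) :: r) t = ((pvSelect ((u, du) :: r) t, d) : Int × Int).1 from rfl,
      he]
  · exact le_of_lt ((List.pairwise_cons.mp hpw).1 _ hm)

-- the loop invariant of B
def pvStackOK (q : List Int) (st : List (Int × Int)) : Prop :=
  st ≠ [] ∧
  List.IsChain (fun a b => b.1 < a.1) st ∧
  (∀ e ∈ st.dropLast, 1 ≤ e.2) ∧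
  (st.getLastD (0,0)).2 = 0 ∧
  (∀ t : ℕ, pvLam q t = pvSelect st t)

def pvInv (q : List Int) (s : Int × List (Int × Int)) : Prop :=
  s.1 = (pvAcount q : Int) ∧ ((q = [] ∧ s.2 = []) ∨ (q ≠ [] ∧ pvStackOK q s.2))

theorem pvGetLastD_append {α : Type} (l₁ : List α) {l₂ : List α} (h : l₂ ≠ []) (d : α) :
    (l₁ ++ l₂).getLastD d = l₂.getLastD d := by
  induction l₁ with
  | nil => rfl
  | cons x l ih => rw [List.cons_append, pvGetLastD_cons (by simp [h]) d, ih]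

theorem pvInv_step {q : List Int} {s : Int × List (Int × Int)} (h : pvInv q s) (v : Int) :
    pvInv (q ++ [v]) (pvBStep s v) := by
  obtain ⟨a, st⟩ := s
  obtain ⟨hans, hrest⟩ := h
  dsimp only at hans
  rcases hrest with ⟨hq, hst⟩ | ⟨hq, hok⟩
  · -- q = [] and the stack is empty: v is pushed as immortal
    dsimp only at hst
    subst hq hst
    have hA0 : pvAcount [] = 0 := by rw [pvAcount]; simp
    have hAv : pvAcount [v] = 0 := by rw [pvAcount]; simp
    have hchv : List.IsChain (· ≥ ·) [v] := List.IsChain.singleton ..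
    constructor
    · show max a (if ([] : List (Int × Int)) = [] then 0 else (pvPop [] v 0).1 + 1) = _
      rw [hans, hA0]
      simp [hAv]
    · refine Or.inr ⟨by simp, ?_, ?_, ?_, ?_, ?_⟩
      · show ((v, _) :: (pvPop [] v 0).2) ≠ []
        simp
      · show List.IsChain _ ((v, _) :: (pvPop [] v 0).2)
        exact List.IsChain.singleton ..
      · show ∀ e ∈ ((v, _) :: (pvPop [] v 0).2).dropLast, 1 ≤ e.2
        simp [pvPop]
      · show ((((v, if ([] : List (Int × Int)) = [] then 0 else (pvPop [] v 0).1 + 1) ::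
            (pvPop [] v 0).2)).getLastD (0,0)).2 = 0
        simp [pvPop]
      · intro t
        show pvLam ([] ++ [v]) t = pvSelect ((v, _) :: (pvPop [] v 0).2) t
        have hfix : pvStep^[t] [v] = [v] := by
          have := pvIter_stable (t := 0) (q := [v]) (by simpa using hchv) (Nat.zero_le t)
          simpa using this
        simp only [List.nil_append, pvLam, hfix, pvPop, pvSelect]
        simp
  · obtain ⟨hne, hchain, hmort, hlast, hsel⟩ := hok
    dsimp only at hne hchain hmort hlast hsel
    obtain ⟨pp, hsplit, hppv, hfst, hhead⟩ := pvPop_spec st v 0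
    by_cases hre : (pvPop st v 0).2 = []
    · -- every stack entry is popped: v is a new minimum, immortal
      rw [hre, List.append_nil] at hsplit
      have hall : ∀ t, v ≤ pvLam q t := by
        intro t
        obtain ⟨d, hd⟩ := pvSelect_mem hne hlast t
        rw [hsel t, hsplit]
        exact hppv _ (hsplit ▸ hd)
      have hAeq : pvAcount (q ++ [v]) = pvAcount q := pvAcount_append_immortal hq v hall
      constructor
      · show max a (if (pvPop st v 0).2 = [] then 0 else (pvPop st v 0).1 + 1) = _
        rw [if_pos hre, hans, hAeq]
        exact max_eq_left (Int.natCast_nonneg _)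
      · refine Or.inr ⟨by simp, ?_, ?_, ?_, ?_, ?_⟩
        · show ((v, _) :: (pvPop st v 0).2) ≠ []
          simp
        · show List.IsChain _ ((v, _) :: (pvPop st v 0).2)
          rw [hre]
          exact List.IsChain.singleton ..
        · show ∀ e ∈ ((v, _) :: (pvPop st v 0).2).dropLast, 1 ≤ e.2
          rw [hre]
          simp
        · show ((((v, if (pvPop st v 0).2 = [] then 0 else (pvPop st v 0).1 + 1) ::
              (pvPop st v 0).2)).getLastD (0,0)).2 = 0
          rw [hre]
          simp
        · intro t
          show pvLam (q ++ [v]) t = pvSelect ((v, if (pvPop st v 0).2 = [] then 0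
              else (pvPop st v 0).1 + 1) :: (pvPop st v 0).2) t
          have hl : pvStep^[t] (q ++ [v]) = pvStep^[t] q ++ [v] :=
            pvIter_append_le hq v t (fun s _ => hall s)
          rw [pvLam, hl, List.getLastD_concat, hre, if_pos rfl]
          simp [pvSelect]
    · -- some entry survives: v dies on day (max popped death day) + 1
      obtain ⟨⟨u, du⟩, r', hre'⟩ := List.exists_cons_of_ne_nil hre
      have hdrop : st.dropLast = pp ++ (pvPop st v 0).2.dropLast := by
        conv_lhs => rw [hsplit, hre']
        rw [List.dropLast_append_cons, ← hre']
      have hmaxd0 : 0 ≤ (pvPop st v 0).1 := hfst ▸ pvMaxD_ge_init 0 pp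
      have hs₀ : (((pvPop st v 0).1.toNat : ℕ) : Int) = (pvPop st v 0).1 :=
        Int.toNat_of_nonneg hmaxd0
      have hppmort : ∀ e ∈ pp, 1 ≤ e.2 := by
        intro e he
        exact hmort e (hdrop ▸ List.mem_append_left _ he)
      have hppbnd : ∀ e ∈ pp, e.2 ≤ (pvPop st v 0).1 := by
        intro e he
        rw [hfst]
        exact pvMaxD_ge_mem 0 he
      have h2 : ∀ sn, sn < (pvPop st v 0).1.toNat → v ≤ pvLam q sn := by
        intro sn hsn
        rw [hsel sn]
        have hcast : (sn : Int) < (pvPop st v 0).1 := by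
          rw [← hs₀]; exact_mod_cast hsn
        rcases pvMaxD_cases 0 pp with hc | ⟨e, he, hc⟩
        · rw [hfst, hc] at hcast
          exact absurd hcast (by omega)
        · have hq2 : e.2 = 0 ∨ (sn : Int) < e.2 :=
            Or.inr (by rw [hfst, hc] at hcast; exact hcast)
          obtain ⟨d, hd⟩ := pvSelect_append_qual he hq2 (pvPop st v 0).2
          rw [hsplit]
          exact hppv _ hd
      have hdisq : ∀ (t : ℕ), (pvPop st v 0).1 ≤ (t : Int) →
          ∀ e ∈ pp, ¬(e.2 = 0 ∨ (t : Int) < e.2) := by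
        intro t ht e he
        have h1e := hppmort e he
        have h2e := hppbnd e he
        rintro (h3 | h3) <;> omega
      have hchain2 : List.IsChain (fun (a b : Int × Int) => b.1 < a.1) (pvPop st v 0).2 :=
        (List.isChain_append.mp (hsplit ▸ hchain)).2.1
      have hlast2 : ((pvPop st v 0).2.getLastD (0,0)).2 = 0 := by
        rw [hsplit, pvGetLastD_append pp hre (0,0)] at hlast
        exact hlast
      have h1gen : ∀ n : ℕ, (n : Int) = (pvPop st v 0).1 → pvLam q n < v := by
        intro nn hnn
        rw [hsel nn, hsplit, pvSelect_append_skip (hdisq nn (le_of_eq hnn.symm)) _, hre']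
        exact lt_of_le_of_lt (pvSelect_le_head (hre' ▸ hchain2) (hre' ▸ hlast2) _)
          (hhead u du r' hre')
      have h1 : pvLam q (pvPop st v 0).1.toNat < v := h1gen _ hs₀
      have hAeq : pvAcount (q ++ [v]) = max (pvAcount q) ((pvPop st v 0).1.toNat + 1) :=
        pvAcount_append_mortal hq v h1 h2
      constructor
      · show max a (if (pvPop st v 0).2 = [] then 0 else (pvPop st v 0).1 + 1) = _
        rw [if_neg hre, hans, hAeq]
        push_cast
        rw [hs₀]
      · refine Or.inr ⟨by simp, ?_, ?_, ?_, ?_, ?_⟩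
        · show ((v, _) :: (pvPop st v 0).2) ≠ []
          simp
        · show List.IsChain _ ((v, _) :: (pvPop st v 0).2)
          rw [hre']
          refine List.isChain_cons.mpr ⟨?_, hre' ▸ hchain2⟩
          intro y hy
          simp only [List.head?_cons, Option.mem_def, Option.some.injEq] at hy
          subst hy
          exact hhead u du r' hre'
        · show ∀ e ∈ ((v, if (pvPop st v 0).2 = [] then 0 else (pvPop st v 0).1 + 1) ::
              (pvPop st v 0).2).dropLast, 1 ≤ e.2
          rw [if_neg hre]
          intro e he
          rw [hre', List.dropLast_cons₂] at he
          rcases List.mem_cons.mp he with rfl | hm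
          · dsimp only
            omega
          · exact hmort e (hdrop ▸ (hre' ▸ List.mem_append_right pp hm))
        · show ((((v, if (pvPop st v 0).2 = [] then 0 else (pvPop st v 0).1 + 1) ::
              (pvPop st v 0).2)).getLastD (0,0)).2 = 0
          rw [pvGetLastD_cons hre (0,0)]
          exact hlast2
        · intro t
          show pvLam (q ++ [v]) t =
            pvSelect ((v, if (pvPop st v 0).2 = [] then 0 else (pvPop st v 0).1 + 1) ::
              (pvPop st v 0).2) t
          rw [if_neg hre]
          by_cases hts : t ≤ (pvPop st v 0).1.toNat
          · have hqual : (pvPop st v 0).1 + 1 = 0 ∨ (t : Int) < (pvPop st v 0).1 + 1 := by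
              right
              have ht2 : (t : Int) ≤ (pvPop st v 0).1 := by
                rw [← hs₀]; exact_mod_cast hts
              omega
            have hl : pvStep^[t] (q ++ [v]) = pvStep^[t] q ++ [v] :=
              pvIter_append_le hq v t (fun sn hsn => h2 sn (lt_of_lt_of_le hsn hts))
            rw [pvLam, hl, List.getLastD_concat]
            simp only [pvSelect, if_pos hqual]
          · have hts' : (pvPop st v 0).1.toNat < t := Nat.lt_of_not_le hts
            have hcast : (pvPop st v 0).1 < (t : Int) := by
              rw [← hs₀]; exact_mod_cast hts'
            have hnq : ¬((pvPop st v 0).1 + 1 = 0 ∨ (t : Int) < (pvPop st v 0).1 + 1) := by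
              rintro (h3 | h3) <;> omega
            have hl : pvLam (q ++ [v]) t = pvLam q t := by
              unfold pvLam
              rw [pvIter_append_drop hq v h1 h2 hts']
            have hrhs : pvSelect ((v, (pvPop st v 0).1 + 1) :: (pvPop st v 0).2) t =
                pvSelect (pvPop st v 0).2 t := by
              simp only [pvSelect, if_neg hnq]
            have hlhs : pvLam q t = pvSelect (pvPop st v 0).2 t := by
              conv_lhs => rw [hsel t, hsplit]
              exact pvSelect_append_skip (hdisq t (le_of_lt hcast)) _
            rw [hl, hrhs, hlhs]

theorem pvInv_foldl (rest : List Int) : ∀ (q : List Int) (s : Int × List (Int × Int)),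
    pvInv q s → pvInv (q ++ rest) (rest.foldl pvBStep s) := by
  induction rest with
  | nil => intro q s h; simpa using h
  | cons v rest' ih =>
      intro q s h
      have h2 := ih (q ++ [v]) (pvBStep s v) (pvInv_step h v)
      rw [List.foldl_cons]
      simpa [List.append_assoc] using h2

theorem pvGoA_eq (q : List Int) (opt : Int) : pvGoA opt q = opt + (pvAcount q : Int) := by
  induction opt, q using pvGoA.induct with
  | case1 opt =>
      rw [pvGoA, pvAcount]
      simp
  | case2 opt x rest h ih =>
      have hnc : ¬ List.IsChain (· ≥ ·) (x :: rest) := by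
        intro hc
        rw [← pvStepA_fst_false_iff] at hc
        rw [hc] at h
        exact Bool.false_ne_true h
      have hA : pvAcount (x :: rest) = 1 + pvAcount (pvStep (x :: rest)) := by
        rw [pvAcount]; simp [hnc]
      rw [pvGoA, dif_pos h]
      have hstep : pvStep (x :: rest) = x :: (pvStepA x rest).2 := rfl
      rw [ih, hA, ← hstep]
      push_cast
      ring
  | case3 opt x rest h =>
      have hc : List.IsChain (· ≥ ·) (x :: rest) := by
        apply (pvStepA_fst_false_iff x rest).mp
        cases hb : (pvStepA x rest).1 with
        | false => rfl
        | true => exact absurd hb h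
      have hA : pvAcount (x :: rest) = 0 := by rw [pvAcount]; simp [hc]
      rw [pvGoA, dif_neg h, hA]
      simp

-- ===== VERDICT (by name: the statement is the Claim_ definition above) =====
theorem poisonousPlants_bruteForce_spec : Claim_equal_poisonousPlants_bruteForce := by
  intro n p _
  unfold Spec_poisonousPlants_bruteForce poisonousPlants_bruteForce poisonousPlants_bruteForce_alt
  have h0 : pvInv [] ((0 : Int), ([] : List (Int × Int))) := by
    constructor
    · simp [pvAcount]
    · exact Or.inl ⟨rfl, rfl⟩
  have h := pvInv_foldl p [] ((0 : Int), ([] : List (Int × Int))) h0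
  simp only [List.nil_append] at h
  rw [pvGoA_eq, h.1]
  ring
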